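-- pv_equiv track=rewrite | github.com/lm2612/MiMA_analysis | clim_functions/get_seasonal_inds.py | get_seasonal_inds
-- ===== SOURCE A (Python) =====
-- def get_seasonal_inds(n_days):
--     """ Returns 4 lists of indicies for DJF, MAM, JJA and SON to allow quick sub-selection
--     over variables for each season. Assumes time series starts in Jan"""
--     DJF = list(range(0, 60)) + list(range(330, 360))
--     MAM = list(range(60, 150))
--     JJA = list(range(150, 240))
--     SON = list(range(240, 330))
--     DJF_inds = [i for i in range(n_days) if i%360 in DJF]
--     MAM_inds = [i for i in range(n_days) if i%360 in MAM]
--     JJA_inds = [i for i in range(n_days) if i%360 in JJA]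
--     SON_inds = [i for i in range(n_days) if i%360 in SON]
--
--     return DJF_inds, MAM_inds, JJA_inds, SON_inds
-- ===== SOURCE B (Python) =====
-- def get_seasonal_inds(n_days):
--     """Single pass: bucket each day by its position in the 360-day year."""
--     DJF_inds, MAM_inds, JJA_inds, SON_inds = [], [], [], []
--     for i in range(n_days):
--         m = i % 360
--         if m < 60 or m >= 330:
--             DJF_inds.append(i)
--         elif m < 150:
--             MAM_inds.append(i)
--         elif m < 240:
--             JJA_inds.append(i)
--         else:
--             SON_inds.append(i)
--     return DJF_inds, MAM_inds, JJA_inds, SON_inds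
-- ===== Notes on version B (the rewrite author's own statement) =====
-- stated objective: faster
-- what changed: Replaces four separate filtering passes over the day range, each testing membership of the day-of-year in a precomputed list by linear scan, with one loop that computes the day-of-year once per index and dispatches it into exactly one of the four season lists via chained O(1) comparisons.
import Mathlib
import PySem

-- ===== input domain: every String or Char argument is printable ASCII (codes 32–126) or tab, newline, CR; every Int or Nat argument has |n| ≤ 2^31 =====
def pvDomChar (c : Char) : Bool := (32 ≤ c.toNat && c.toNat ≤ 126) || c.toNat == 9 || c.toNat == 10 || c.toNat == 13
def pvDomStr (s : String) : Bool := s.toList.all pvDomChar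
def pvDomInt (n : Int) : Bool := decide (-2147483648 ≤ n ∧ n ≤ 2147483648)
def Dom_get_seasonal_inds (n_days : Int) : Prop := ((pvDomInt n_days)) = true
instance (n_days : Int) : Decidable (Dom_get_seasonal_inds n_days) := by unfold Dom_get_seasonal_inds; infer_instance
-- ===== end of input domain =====

-- B replaces A's four filtering passes (each with a list-membership scan) by one loop
-- that computes i % 360 once and dispatches i into exactly one season list (simpler).

-- ===== PORT A =====
def get_seasonal_inds (n_days : Int) : List (List Int) :=
  let DJF := PySem.List.pyRange 0 60 1 ++ PySem.List.pyRange 330 360 1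
  let MAM := PySem.List.pyRange 60 150 1
  let JJA := PySem.List.pyRange 150 240 1
  let SON := PySem.List.pyRange 240 330 1
  let r := PySem.List.pyRange 0 n_days 1
  let DJF_inds := r.filter (fun i => DJF.contains (PySem.Int.mod i 360))
  let MAM_inds := r.filter (fun i => MAM.contains (PySem.Int.mod i 360))
  let JJA_inds := r.filter (fun i => JJA.contains (PySem.Int.mod i 360))
  let SON_inds := r.filter (fun i => SON.contains (PySem.Int.mod i 360))
  [DJF_inds, MAM_inds, JJA_inds, SON_inds]

-- ===== PORT B =====
-- the single-pass dispatch loop of Source B, as a foldl over the same range with a 4-list state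
def get_seasonal_inds_alt (n_days : Int) : List (List Int) :=
  let s := (PySem.List.pyRange 0 n_days 1).foldl
    (fun (acc : List Int × List Int × List Int × List Int) i =>
      let m := PySem.Int.mod i 360
      if m < 60 ∨ 330 ≤ m then (acc.1 ++ [i], acc.2.1, acc.2.2.1, acc.2.2.2)
      else if m < 150 then (acc.1, acc.2.1 ++ [i], acc.2.2.1, acc.2.2.2)
      else if m < 240 then (acc.1, acc.2.1, acc.2.2.1 ++ [i], acc.2.2.2)
      else (acc.1, acc.2.1, acc.2.2.1, acc.2.2.2 ++ [i]))
    ([], [], [], [])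
  [s.1, s.2.1, s.2.2.1, s.2.2.2]

-- ===== PRECONDITION & SPEC =====
def Spec_get_seasonal_inds (n_days : Int) (out : List (List Int)) : Prop := out = get_seasonal_inds_alt n_days
instance (n_days : Int) (out : List (List Int)) : Decidable (Spec_get_seasonal_inds n_days out) := by unfold Spec_get_seasonal_inds; infer_instance

-- ===== CLAIM (what is proved, stated in full; the proofs are below) =====
def Claim_equal_get_seasonal_inds : Prop := ∀ (n_days : Int), Dom_get_seasonal_inds n_days → Spec_get_seasonal_inds n_days (get_seasonal_inds n_days)

-- ===== LEMMAS AND PROOFS =====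

theorem pv_mem_DJF (x : Int) :
    ((PySem.List.pyRange 0 60 1 ++ PySem.List.pyRange 330 360 1).contains (PySem.Int.mod x 360))
      = decide (PySem.Int.mod x 360 < 60 ∨ 330 ≤ PySem.Int.mod x 360) := by
  have h0 := PySem.Int.mod_nonneg x (b := 360) (by norm_num)
  have h1 := PySem.Int.mod_lt x (b := 360) (by norm_num)
  rw [Bool.eq_iff_iff]
  simp only [List.contains_iff_mem, List.mem_append, PySem.List.mem_pyRange_one,
    decide_eq_true_eq]
  omega

theorem pv_mem_MAM (x : Int) :
    ((PySem.List.pyRange 60 150 1).contains (PySem.Int.mod x 360))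
      = decide (60 ≤ PySem.Int.mod x 360 ∧ PySem.Int.mod x 360 < 150) := by
  rw [Bool.eq_iff_iff]
  simp only [List.contains_iff_mem, PySem.List.mem_pyRange_one, decide_eq_true_eq]

theorem pv_mem_JJA (x : Int) :
    ((PySem.List.pyRange 150 240 1).contains (PySem.Int.mod x 360))
      = decide (150 ≤ PySem.Int.mod x 360 ∧ PySem.Int.mod x 360 < 240) := by
  rw [Bool.eq_iff_iff]
  simp only [List.contains_iff_mem, PySem.List.mem_pyRange_one, decide_eq_true_eq]

theorem pv_mem_SON (x : Int) :
    ((PySem.List.pyRange 240 330 1).contains (PySem.Int.mod x 360))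
      = decide (240 ≤ PySem.Int.mod x 360 ∧ PySem.Int.mod x 360 < 330) := by
  rw [Bool.eq_iff_iff]
  simp only [List.contains_iff_mem, PySem.List.mem_pyRange_one, decide_eq_true_eq]

-- the single-pass fold with generalized accumulators equals the four filters
theorem pv_fold4 (l : List Int) (a b c d : List Int) :
    l.foldl
      (fun (acc : List Int × List Int × List Int × List Int) i =>
        let m := PySem.Int.mod i 360
        if m < 60 ∨ 330 ≤ m then (acc.1 ++ [i], acc.2.1, acc.2.2.1, acc.2.2.2)
        else if m < 150 then (acc.1, acc.2.1 ++ [i], acc.2.2.1, acc.2.2.2)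
        else if m < 240 then (acc.1, acc.2.1, acc.2.2.1 ++ [i], acc.2.2.2)
        else (acc.1, acc.2.1, acc.2.2.1, acc.2.2.2 ++ [i]))
      (a, b, c, d)
    = (a ++ l.filter (fun x => decide (PySem.Int.mod x 360 < 60 ∨ 330 ≤ PySem.Int.mod x 360)),
       b ++ l.filter (fun x => decide (60 ≤ PySem.Int.mod x 360 ∧ PySem.Int.mod x 360 < 150)),
       c ++ l.filter (fun x => decide (150 ≤ PySem.Int.mod x 360 ∧ PySem.Int.mod x 360 < 240)),
       d ++ l.filter (fun x => decide (240 ≤ PySem.Int.mod x 360 ∧ PySem.Int.mod x 360 < 330))) := by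
  induction l generalizing a b c d with
  | nil => simp
  | cons x l ih =>
    have h0 := PySem.Int.mod_nonneg x (b := 360) (by norm_num)
    have h1 := PySem.Int.mod_lt x (b := 360) (by norm_num)
    simp only [List.foldl_cons, List.filter_cons]
    by_cases hD : PySem.Int.mod x 360 < 60 ∨ 330 ≤ PySem.Int.mod x 360
    · rw [if_pos hD, decide_eq_true hD,
          decide_eq_false (show ¬(60 ≤ PySem.Int.mod x 360 ∧ PySem.Int.mod x 360 < 150) by omega),
          decide_eq_false (show ¬(150 ≤ PySem.Int.mod x 360 ∧ PySem.Int.mod x 360 < 240) by omega),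
          decide_eq_false (show ¬(240 ≤ PySem.Int.mod x 360 ∧ PySem.Int.mod x 360 < 330) by omega)]
      rw [ih]; simp
    · rw [if_neg hD, decide_eq_false hD]
      by_cases hM : PySem.Int.mod x 360 < 150
      · rw [if_pos hM, decide_eq_true (show 60 ≤ PySem.Int.mod x 360 ∧ PySem.Int.mod x 360 < 150 by omega),
            decide_eq_false (show ¬(150 ≤ PySem.Int.mod x 360 ∧ PySem.Int.mod x 360 < 240) by omega),
            decide_eq_false (show ¬(240 ≤ PySem.Int.mod x 360 ∧ PySem.Int.mod x 360 < 330) by omega)]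
        rw [ih]; simp
      · rw [if_neg hM, decide_eq_false (show ¬(60 ≤ PySem.Int.mod x 360 ∧ PySem.Int.mod x 360 < 150) by omega)]
        by_cases hJ : PySem.Int.mod x 360 < 240
        · rw [if_pos hJ, decide_eq_true (show 150 ≤ PySem.Int.mod x 360 ∧ PySem.Int.mod x 360 < 240 by omega),
              decide_eq_false (show ¬(240 ≤ PySem.Int.mod x 360 ∧ PySem.Int.mod x 360 < 330) by omega)]
          rw [ih]; simp
        · rw [if_neg hJ, decide_eq_false (show ¬(150 ≤ PySem.Int.mod x 360 ∧ PySem.Int.mod x 360 < 240) by omega),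
              decide_eq_true (show 240 ≤ PySem.Int.mod x 360 ∧ PySem.Int.mod x 360 < 330 by omega)]
          rw [ih]; simp

-- ===== VERDICT (by name: the statement is the Claim_ definition above) =====
theorem get_seasonal_inds_spec : Claim_equal_get_seasonal_inds := by
  intro n _
  unfold Spec_get_seasonal_inds get_seasonal_inds get_seasonal_inds_alt
  simp only [pv_fold4, pv_mem_DJF, pv_mem_MAM, pv_mem_JJA, pv_mem_SON, List.nil_append]
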